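-- pv_equiv track=rewrite | github.com/modernmt/DataCollection | baseline/download_candidates.py | extract_html
-- ===== SOURCE A (Python) =====
-- def extract_html(raw_page):
--     empty_lines_seen = 0
--     page = raw_page.split("\n")
--     for linenr, line in enumerate(page):
--         if not line.strip():
--             empty_lines_seen += 1
--             if empty_lines_seen == 2:
--                 return "\n".join(page[linenr + 1:])
--     raise ValueError("Input must contain two empty lines")
-- ===== SOURCE B (Python) =====
-- def extract_html(raw_page):
--     it = iter(raw_page.split("\n"))
--     for _ in range(2):
--         for line in it:
--             if not line.strip():
--                 break
--         else:
--             raise ValueError("Input must contain two empty lines")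
--     return "\n".join(it)
-- ===== Notes on version B (the rewrite author's own statement) =====
-- stated objective: idiomatic
-- what changed: Replaces the counting scan over enumerate with two staged consumptions of a single iterator ('skip through next blank line' applied twice), so no counter, no indices and no slice are needed; the remainder of the iterator is joined directly.
import Mathlib
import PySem

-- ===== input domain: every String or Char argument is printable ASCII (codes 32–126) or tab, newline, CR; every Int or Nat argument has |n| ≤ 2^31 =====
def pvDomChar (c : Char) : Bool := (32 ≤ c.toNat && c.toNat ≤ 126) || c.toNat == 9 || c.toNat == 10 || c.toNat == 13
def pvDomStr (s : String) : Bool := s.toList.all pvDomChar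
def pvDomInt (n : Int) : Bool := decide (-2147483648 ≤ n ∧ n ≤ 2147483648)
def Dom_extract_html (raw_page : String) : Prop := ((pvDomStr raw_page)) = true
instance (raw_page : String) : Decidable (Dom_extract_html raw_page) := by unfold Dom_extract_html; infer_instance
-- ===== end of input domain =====

-- B replaces A's counting scan (enumerate + running blank counter + slice) with two staged
-- consumptions of one iterator: 'skip through the next blank line' applied twice, then join
-- the remainder (objective: idiomatic, same cost).

-- ===== PORT A =====
-- A's loop over enumerate(page): counts blank (whitespace-only) lines;
-- at the second blank returns "\n".join(page[linenr+1:]); none = loop ended (Python raises ValueError)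
def pvGoA (page : List String) : List (Int × String) → Nat → Option String
  | [], _ => none
  | (linenr, line) :: rest, seen =>
    if PySem.Str.strip line == "" then
      if seen + 1 == 2 then
        some (PySem.Str.join "\n" (PySem.List.slice page (some (linenr + 1)) none))
      else pvGoA page rest (seen + 1)
    else pvGoA page rest seen

def extract_html (raw_page : String) : String :=
  let page := (PySem.Str.split? raw_page "\n").getD []   -- sep "\n" ≠ "", so split? is always some
  (pvGoA page (PySem.List.enumerate page 0) 0).getD ""   -- none = the ValueError case, excluded by Pre_

-- ===== PORT B =====
-- Source B's inner 'for line in it: if not line.strip(): break / else: raise': consume lines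
-- through the first blank one; none = iterator exhausted without a blank (the raise)
def pvSkipBlank : List String → Option (List String)
  | [] => none
  | line :: rest => if PySem.Str.strip line == "" then some rest else pvSkipBlank rest

def extract_html_alt (raw_page : String) : String :=
  let it := (PySem.Str.split? raw_page "\n").getD []
  match pvSkipBlank it with                              -- first of the two range(2) stages
  | none => ""                                           -- the ValueError case, excluded by Pre_
  | some it1 =>
    match pvSkipBlank it1 with                           -- second stage
    | none => ""                                         -- the ValueError case, excluded by Pre_
    | some it2 => PySem.Str.join "\n" it2

-- ===== PRECONDITION & SPEC =====
-- A raises ValueError when the input has fewer than two blank (whitespace-only) lines; those inputs are excluded.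
def Pre_extract_html (raw_page : String) : Prop :=
  2 ≤ (((PySem.Str.split? raw_page "\n").getD []).filter
        (fun line => PySem.Str.strip line == "")).length
instance (raw_page : String) : Decidable (Pre_extract_html raw_page) := by
  unfold Pre_extract_html; infer_instance

def pvWitness_extract_html : String := "a\n\nb\n \nc\nd"

def Spec_extract_html (raw_page : String) (out : String) : Prop := out = extract_html_alt raw_page
instance (raw_page : String) (out : String) : Decidable (Spec_extract_html raw_page out) := by unfold Spec_extract_html; infer_instance

-- ===== CLAIM (what is proved, stated in full; the proofs are below) =====
def Claim_equal_extract_html : Prop := ∀ (raw_page : String), Dom_extract_html raw_page → Pre_extract_html raw_page → Spec_extract_html raw_page (extract_html raw_page)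

-- ===== LEMMAS AND PROOFS =====

-- With one blank already counted, A's scan over the suffix l = page.drop k (enumerated from k)
-- returns the join of exactly the suffix that B's second skip stage yields.
theorem pvGoA_one (page : List String) :
    ∀ (l : List String) (k : Nat), l = page.drop k →
    pvGoA page (PySem.List.enumerate l k) 1 =
      (pvSkipBlank l).map (fun r => PySem.Str.join "\n" r) := by
  intro l
  induction l with
  | nil => intro k _; simp [PySem.List.enumerate_nil, pvGoA, pvSkipBlank]
  | cons line rest ih =>
    intro k hk
    have hrest : rest = page.drop (k + 1) := by
      have := congrArg List.tail hk
      simpa [List.tail_drop] using this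
    by_cases hb : PySem.Str.strip line == ""
    · have hsl : PySem.List.slice page (some ((k : Int) + 1)) none = rest := by
        have : ((k : Int) + 1) = ((k + 1 : Nat) : Int) := by push_cast; ring
        rw [this, PySem.List.slice_from_natCast, ← hrest]
      simp [PySem.List.enumerate_cons, pvGoA, pvSkipBlank, hb, hsl]
    · have : PySem.List.enumerate rest ((k : Int) + 1) = PySem.List.enumerate rest ((k + 1 : Nat) : Int) := by
        push_cast; ring_nf
      simp only [PySem.List.enumerate_cons, pvGoA, pvSkipBlank, hb, Bool.false_eq_true,
        ite_false, this]
      exact ih (k + 1) hrest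

-- With no blank counted yet, A's scan equals B's two staged skips composed.
theorem pvGoA_zero (page : List String) :
    ∀ (l : List String) (k : Nat), l = page.drop k →
    pvGoA page (PySem.List.enumerate l k) 0 =
      (pvSkipBlank l).bind (fun r1 => (pvSkipBlank r1).map (fun r => PySem.Str.join "\n" r)) := by
  intro l
  induction l with
  | nil => intro k _; simp [PySem.List.enumerate_nil, pvGoA, pvSkipBlank]
  | cons line rest ih =>
    intro k hk
    have hrest : rest = page.drop (k + 1) := by
      have := congrArg List.tail hk
      simpa [List.tail_drop] using this
    by_cases hb : PySem.Str.strip line == ""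
    · have hen : PySem.List.enumerate rest ((k : Int) + 1) = PySem.List.enumerate rest ((k + 1 : Nat) : Int) := by
        push_cast; ring_nf
      simp only [PySem.List.enumerate_cons, pvGoA, pvSkipBlank, hb, if_pos, hen]
      norm_num
      exact pvGoA_one page rest (k + 1) hrest
    · have hen : PySem.List.enumerate rest ((k : Int) + 1) = PySem.List.enumerate rest ((k + 1 : Nat) : Int) := by
        push_cast; ring_nf
      simp only [PySem.List.enumerate_cons, pvGoA, pvSkipBlank, hb, Bool.false_eq_true, ite_false, hen]
      exact ih (k + 1) hrest

-- a list with at least 2 blank lines makes both skip stages succeed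
theorem pvSkipBlank_some : ∀ (l : List String),
    1 ≤ (l.filter (fun line => PySem.Str.strip line == "")).length →
    ∃ r, pvSkipBlank l = some r ∧
      (r.filter (fun line => PySem.Str.strip line == "")).length
        = (l.filter (fun line => PySem.Str.strip line == "")).length - 1 := by
  intro l
  induction l with
  | nil => intro h; simp at h
  | cons line rest ih =>
    intro h
    by_cases hb : PySem.Str.strip line == ""
    · exact ⟨rest, by simp [pvSkipBlank, hb], by simp [hb] at h ⊢⟩
    · have h' : 1 ≤ (rest.filter (fun line => PySem.Str.strip line == "")).length := by
        simpa [hb] using h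
      obtain ⟨r, hr, hlen⟩ := ih h'
      exact ⟨r, by simp [pvSkipBlank, hb, hr], by simpa [hb] using hlen⟩

-- ===== VERDICT (by name: the statement is the Claim_ definition above) =====
theorem extract_html_spec : Claim_equal_extract_html := by
  intro raw_page _ hpre
  unfold Spec_extract_html extract_html extract_html_alt
  dsimp only
  set page := (PySem.Str.split? raw_page "\n").getD [] with hpage
  unfold Pre_extract_html at hpre
  rw [← hpage] at hpre
  have hA := pvGoA_zero page page 0 (by simp)
  norm_num at hA
  obtain ⟨r1, hr1, hlen1⟩ := pvSkipBlank_some page (by omega)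
  obtain ⟨r2, hr2, _⟩ := pvSkipBlank_some r1 (by omega)
  rw [hA, hr1]
  simp [hr2]
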